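-- pv_equiv track=rewrite | github.com/2004Maycon/prog2_aulas | padrao de letra.py | padrao
-- ===== SOURCE A (Python) =====
-- def padrao(m):
--     lista =[]
--     if m[0] not in"AEIOU" and m[1] == "A":
--         for i in range(len(m)):
--             if m[i] =="O":
--                 texto = m[i]
--                 if m not in "AEIOU" and m[i]== "O":
--                     lista.append(texto)
--     return lista
-- ===== SOURCE B (Python) =====
-- def padrao(m):
--     # Early return with the inverted guard (same IndexError behaviour via short-circuit);
--     # otherwise derive the number of "O"s from the fragments produced by splitting on "O":
--     # a string with k occurrences of "O" splits into k+1 pieces.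
--     if m[0] in "AEIOU" or m[1] != "A":
--         return []
--     return ["O"] * (len(m.split("O")) - 1)
-- ===== Notes on version B (the rewrite author's own statement) =====
-- stated objective: alternative
-- what changed: Replaces the positional scan that appends one element per matching character (with redundant inner re-tests) by a split-based fragment count: invert the guard into an early return, split the string on "O", and replicate ["O"] (number of fragments - 1) times.
import Mathlib
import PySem

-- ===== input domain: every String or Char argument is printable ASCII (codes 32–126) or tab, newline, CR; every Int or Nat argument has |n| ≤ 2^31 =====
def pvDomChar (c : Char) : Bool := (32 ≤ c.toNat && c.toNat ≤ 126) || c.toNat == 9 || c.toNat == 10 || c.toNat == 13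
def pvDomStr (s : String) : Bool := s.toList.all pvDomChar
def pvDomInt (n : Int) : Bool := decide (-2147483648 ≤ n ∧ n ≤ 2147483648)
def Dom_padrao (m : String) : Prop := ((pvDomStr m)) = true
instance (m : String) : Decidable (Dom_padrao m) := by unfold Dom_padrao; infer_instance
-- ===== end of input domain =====

-- B inverts the guard into an early return and derives the result by splitting the string
-- on "O" and replicating ["O"] (fragments - 1) times; objective: alternative.

-- ===== PORT A =====
-- m[0]/m[1] raise IndexError outside Pre_padrao; the `.getD ' '` default is unreachable on Pre_.
def padrao (m : String) : List String :=
  let s := m.toList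
  if (!PySem.Chars.isIn [(PySem.List.pyGetD s 0 ' ')] "AEIOU".toList)
     && (PySem.List.pyGetD s 1 ' ' == 'A') then
    (PySem.List.pyRange 0 (PySem.Chars.len s) 1).foldl (fun lista i =>
      let ci := PySem.List.pyGetD s i ' '
      if ci == 'O' then
        let texto := String.ofList [ci]
        if (!PySem.Chars.isIn s "AEIOU".toList) && (ci == 'O') then
          lista ++ [texto]
        else lista
      else lista) []
  else []

-- ===== PORT B =====
-- m.split("O") with a nonempty separator is Chars.splitOn s ['O'] (split? returns some of it).
def padrao_alt (m : String) : List String :=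
  let s := m.toList
  if PySem.Chars.isIn [(PySem.List.pyGetD s 0 ' ')] "AEIOU".toList
     || !(PySem.List.pyGetD s 1 ' ' == 'A') then
    []
  else
    List.replicate ((PySem.Chars.splitOn s ['O']).length - 1) "O"

-- ===== PRECONDITION & SPEC =====
-- Pre_ excludes exactly the inputs where Python A raises IndexError: the empty string,
-- and 1-char strings whose char is not a vowel (there m[1] is evaluated).
def Pre_padrao (m : String) : Prop :=
  2 ≤ m.toList.length ∨ (m.toList.length = 1 ∧ m.toList.headD ' ' ∈ ['A', 'E', 'I', 'O', 'U'])
instance (m : String) : Decidable (Pre_padrao m) := by unfold Pre_padrao; infer_instance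

def pvWitness_padrao : String := "BAXO"

def Spec_padrao (m : String) (out : List String) : Prop := out = padrao_alt m
instance (m : String) (out : List String) : Decidable (Spec_padrao m out) := by unfold Spec_padrao; infer_instance

-- ===== CLAIM (what is proved, stated in full; the proofs are below) =====
def Claim_equal_padrao : Prop := ∀ (m : String), Dom_padrao m → Pre_padrao m → Spec_padrao m (padrao m)

-- ===== LEMMAS AND PROOFS =====

-- If some char of s is outside "AEIOU", then s is not a substring of "AEIOU".
lemma not_isIn_of_mem_not_isIn (s : List Char) (c : Char) (hc : c ∈ s)
    (h : PySem.Chars.isIn [c] "AEIOU".toList = false) :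
    PySem.Chars.isIn s "AEIOU".toList = false := by
  rw [PySem.Chars.isIn_eq_false_iff] at h ⊢
  intro hinf
  obtain ⟨u, v, rfl⟩ := List.append_of_mem hc
  exact h (List.IsInfix.trans ⟨u, v, by simp⟩ hinf)

-- A's loop collects one "O" per occurrence.
lemma foldl_collect_O (f : List String → Char → List String)
    (hfO : ∀ acc, f acc 'O' = acc ++ ["O"])
    (hfne : ∀ acc c, c ≠ 'O' → f acc c = acc) :
    ∀ (s : List Char) (acc : List String),
      s.foldl f acc = acc ++ List.replicate (s.count 'O') "O" := by
  intro s
  induction s with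
  | nil => intro acc; simp
  | cons c t ih =>
    intro acc
    by_cases h : c = 'O'
    · subst h
      rw [List.foldl_cons, hfO, ih, List.count_cons_self, List.replicate_succ]
      simp
    · rw [List.foldl_cons, hfne _ _ h, ih, List.count_cons_of_ne h]

-- Splitting on a single character yields count + 1 pieces.
lemma splitOn_go_length (c : Char) :
    ∀ (fuel : Nat) (l cur : List Char) (acc : List (List Char)),
      l.length ≤ fuel →
      (PySem.Chars.splitOn.go [c] fuel l cur acc).length = acc.length + l.count c + 1 := by
  intro fuel
  induction fuel with
  | zero =>
    intro l cur acc hl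
    have : l = [] := List.eq_nil_of_length_eq_zero (Nat.le_zero.mp hl)
    subst this
    simp [PySem.Chars.splitOn.go]
  | succ n ih =>
    intro l cur acc hl
    cases l with
    | nil => simp [PySem.Chars.splitOn.go]
    | cons d rest =>
      by_cases hd : d = c
      · subst hd
        have : [d].isPrefixOf (d :: rest) = true := by simp [List.isPrefixOf]
        rw [show PySem.Chars.splitOn.go [d] (n+1) (d :: rest) cur acc
              = PySem.Chars.splitOn.go [d] n (List.drop 1 (d :: rest)) [] (cur.reverse :: acc) by
            simp [PySem.Chars.splitOn.go, this]]
        rw [ih _ _ _ (by simpa using Nat.lt_succ_iff.mp (by simpa using hl))]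
        simp [List.count_cons_self]
        omega
      · have hpre : [c].isPrefixOf (d :: rest) = false := by
          simp [List.isPrefixOf]
          exact fun h => hd h.symm
        rw [show PySem.Chars.splitOn.go [c] (n+1) (d :: rest) cur acc
              = PySem.Chars.splitOn.go [c] n rest (d :: cur) acc by
            simp [PySem.Chars.splitOn.go, hpre]]
        rw [ih _ _ _ (by simpa using Nat.lt_succ_iff.mp (by simpa using hl))]
        rw [List.count_cons_of_ne hd]

lemma splitOn_length_single (s : List Char) (c : Char) :
    (PySem.Chars.splitOn s [c]).length = s.count c + 1 := by
  unfold PySem.Chars.splitOn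
  rw [splitOn_go_length c _ _ _ _ (by omega)]
  simp

theorem padrao_spec : Claim_equal_padrao := by
  intro m _ _
  unfold Spec_padrao padrao padrao_alt
  set s := m.toList with hs
  by_cases hg : ((!PySem.Chars.isIn [(PySem.List.pyGetD s 0 ' ')] "AEIOU".toList)
     && (PySem.List.pyGetD s 1 ' ' == 'A')) = true
  · -- A takes its loop; B skips its early return
    have hg' : (PySem.Chars.isIn [(PySem.List.pyGetD s 0 ' ')] "AEIOU".toList
        || !(PySem.List.pyGetD s 1 ' ' == 'A')) = false := by
      rcases Bool.and_eq_true_iff.mp hg with ⟨h1, h2⟩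
      simp at h1 ⊢
      exact ⟨h1, beq_iff_eq.mp h2⟩
    simp only [hg, hg', if_true, Bool.false_eq_true, if_false]
    have h1 : PySem.List.pyGetD s 1 ' ' = 'A' := by
      rcases Bool.and_eq_true_iff.mp hg with ⟨_, h⟩; exact beq_iff_eq.mp h
    have hlen : 1 < s.length := by
      by_contra hl
      rw [not_lt] at hl
      have hnone : PySem.List.pyGet? s 1 = none := by
        rw [PySem.List.pyGet?_eq_none_iff]
        simp [PySem.Raise.InRange]
        omega
      rw [show PySem.List.pyGetD s 1 ' ' = (PySem.List.pyGet? s 1).getD ' ' from rfl, hnone] at h1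
      simp at h1
    have h0mem : PySem.List.pyGetD s 0 ' ' ∈ s := by
      have : PySem.List.pyGetD s 0 ' ' = s[0] := by
        have := PySem.List.pyGetD_eq_getElem s (i := 0) ' ' (by omega) (by exact_mod_cast by omega)
        simpa using this
      rw [this]; exact List.getElem_mem _
    have h0 : PySem.Chars.isIn [(PySem.List.pyGetD s 0 ' ')] "AEIOU".toList = false := by
      rcases Bool.and_eq_true_iff.mp hg with ⟨h, _⟩
      simpa using h
    have hnotin : PySem.Chars.isIn s "AEIOU".toList = false :=
      not_isIn_of_mem_not_isIn s _ h0mem h0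
    rw [show PySem.Chars.len s = PySem.List.len s from rfl,
      PySem.List.foldl_pyRange_zero_pyGetD s ' '
      (fun lista c =>
        if c == 'O' then
          (if (!PySem.Chars.isIn s "AEIOU".toList) && (c == 'O') then lista ++ [String.ofList [c]] else lista)
        else lista) []]
    rw [hnotin]
    rw [foldl_collect_O _ (fun acc => by norm_num) (fun acc c hc => by simp [hc]) s []]
    rw [splitOn_length_single]
    simp
  · -- A skips; B returns early
    rw [Bool.not_eq_true] at hg
    have hg' : (PySem.Chars.isIn [(PySem.List.pyGetD s 0 ' ')] "AEIOU".toList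
        || !(PySem.List.pyGetD s 1 ' ' == 'A')) = true := by
      rcases Bool.and_eq_false_iff.mp hg with h | h
      · simp at h; simp [h]
      · simp [h]
    simp only [hg, hg', Bool.false_eq_true, if_false, if_true]
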